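-- pv_equiv track=rewrite | github.com/WurabeSeiji/ai-chat-logs-open | BH熱力学プログラム/computations/packing_numerical.py | N_count
-- ===== SOURCE A (Python) =====
-- from collections import Counter
-- from math import factorial
--
-- def N_count(k: int) -> int:
--     """Exact count N(k) of integer 4-tuples satisfying the packing condition."""
--     R = 2 * k + 1
--     # Use integer arithmetic by multiplying through by 4:
--     # condition (|x|+1/2)^2 + ... <= R^2  <=>  sum (2|x|+1)^2 <= (2R)^2
--     target = (2 * R) ** 2  # = (4k+2)^2
--     bound = R  # upper bound on |x_i| (a safe over-estimate)
--     total = 0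
--     for y1 in range(0, bound + 1):
--         s1 = (2 * y1 + 1) ** 2
--         if s1 > target:
--             break
--         for y2 in range(0, y1 + 1):
--             s2 = s1 + (2 * y2 + 1) ** 2
--             if s2 > target:
--                 break
--             for y3 in range(0, y2 + 1):
--                 s3 = s2 + (2 * y3 + 1) ** 2
--                 if s3 > target:
--                     break
--                 for y4 in range(0, y3 + 1):
--                     s4 = s3 + (2 * y4 + 1) ** 2
--                     if s4 > target:
--                         break
--                     # sign multiplicity
--                     nz = sum(1 for y in (y1, y2, y3, y4) if y > 0)
--                     sign_mult = 1 << nz  # 2^nz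
--                     # permutation multiplicity
--                     counts = Counter((y1, y2, y3, y4))
--                     perm_mult = 24
--                     for c in counts.values():
--                         perm_mult //= factorial(c)
--                     total += sign_mult * perm_mult
--     return total
-- ===== SOURCE B (Python) =====
-- def N_count(k: int) -> int:
--     """Exact count N(k) of integer 4-tuples satisfying the packing condition.
--
--     Split the four coordinates into two pairs: build the distribution of pair
--     sums once, sort it, and combine two pairs with a running two-pointer prefix weight.
--     """
--     target = (4 * k + 2) ** 2  # (2R)^2 with R = 2k+1
--     singles = []  # ((2y+1)^2, sign multiplicity of |x| = y)
--     for y in range(2 * k + 2):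
--         s = (2 * y + 1) ** 2
--         if s > target:
--             break
--         singles.append((s, 1 if y == 0 else 2))
--     pairs = []  # weighted distribution of admissible pair sums
--     for s1, c1 in singles:
--         for s2, c2 in singles:
--             if s1 + s2 <= target:
--                 pairs.append((s1 + s2, c1 * c2))
--     pairs.sort(key=lambda p: p[0])
--     total = 0
--     j = len(pairs)
--     w = 0  # running weight of pairs[:j]
--     for _, c in pairs:
--         w += c
--     for s, c in pairs:
--         while j > 0 and pairs[j - 1][0] > target - s:
--             j -= 1
--             w -= pairs[j][1]
--         total += c * w
--     return total
-- ===== Notes on version B (the rewrite author's own statement) =====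
-- stated objective: faster
-- what changed: Replaces the quadruple nested loop over sorted representatives with Counter/factorial multiplicities by splitting the four coordinates into two pairs: build the weighted distribution of admissible pair sums once, sort it, and combine two pairs with a running two-pointer prefix weight.
import Mathlib
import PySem

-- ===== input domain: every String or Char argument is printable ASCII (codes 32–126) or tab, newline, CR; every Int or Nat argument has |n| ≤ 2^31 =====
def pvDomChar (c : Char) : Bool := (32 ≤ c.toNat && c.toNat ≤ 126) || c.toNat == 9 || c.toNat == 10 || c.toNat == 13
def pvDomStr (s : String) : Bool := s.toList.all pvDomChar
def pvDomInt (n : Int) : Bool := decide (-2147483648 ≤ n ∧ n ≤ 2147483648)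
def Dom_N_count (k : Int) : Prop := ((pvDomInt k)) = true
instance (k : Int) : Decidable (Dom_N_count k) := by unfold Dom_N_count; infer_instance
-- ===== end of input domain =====

-- B replaces A's quadruple loop over sorted representatives by a pair-sum distribution
-- (two coordinates at a time) combined via sorting and a running two-pointer prefix weight
-- (measured faster in a timing run).

-- ===== PORT A =====
-- shared helper: Python's 'for y in ys: if stop(y): break; <step>' with loop state σ
def pvFor {σ : Type} (stop : Int → Bool) (step : σ → Int → σ) : List Int → σ → σ
  | [], t => t
  | y :: r, t => if stop y then t else pvFor stop step r (step t y)

-- math.factorial (called on Counter values, which are ≥ 1 here; exact there)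
def pvFactorial (n : Int) : Int := (Nat.factorial n.toNat : Int)

-- perm_mult = 24 // factorial(c) over Counter((y1,y2,y3,y4)).values()
def pvPermMult (y1 y2 y3 y4 : Int) : Int :=
  List.foldl (fun p c => PySem.Int.floordiv p (pvFactorial c)) 24
    (PySem.Dict.counter [y1, y2, y3, y4]).values

-- sign_mult = 1 << nz, nz = sum(1 for y in (…) if y > 0)  (nz is ≥ 0, so .toNat is exact)
def pvSignMult (y1 y2 y3 y4 : Int) : Int :=
  (1 : Int) <<< (([y1, y2, y3, y4].map (fun y => if 0 < y then (1 : Int) else 0)).sum).toNat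

def N_count (k : Int) : Int :=
  let R := 2 * k + 1
  let target := (2 * R) ^ 2
  let bound := R
  pvFor (fun y1 => decide (target < (2 * y1 + 1) ^ 2))
    (fun t y1 =>
      let s1 := (2 * y1 + 1) ^ 2
      pvFor (fun y2 => decide (target < s1 + (2 * y2 + 1) ^ 2))
        (fun t y2 =>
          let s2 := s1 + (2 * y2 + 1) ^ 2
          pvFor (fun y3 => decide (target < s2 + (2 * y3 + 1) ^ 2))
            (fun t y3 =>
              let s3 := s2 + (2 * y3 + 1) ^ 2
              pvFor (fun y4 => decide (target < s3 + (2 * y4 + 1) ^ 2))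
                (fun t y4 => t + pvSignMult y1 y2 y3 y4 * pvPermMult y1 y2 y3 y4)
                (PySem.List.pyRange 0 (y3 + 1)) t)
            (PySem.List.pyRange 0 (y2 + 1)) t)
        (PySem.List.pyRange 0 (y1 + 1)) t)
    (PySem.List.pyRange 0 (bound + 1)) 0

-- ===== PORT B =====
-- 'while j > 0 and pairs[j-1][0] > x: j -= 1; w -= pairs[j][1]'
def pvWhile (ps : List (Int × Int)) (x : Int) : Nat → Int → Nat × Int
  | 0, w => (0, w)
  | j + 1, w =>
    if x < (ps.getD j (0, 0)).1 then pvWhile ps x j (w - (ps.getD j (0, 0)).2)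
    else (j + 1, w)

-- 'for s, c in pairs: <while…>; total += c * w'
def pvCombine (ps : List (Int × Int)) (target : Int) : List (Int × Int) → Int → Nat → Int → Int
  | [], total, _, _ => total
  | (s, c) :: r, total, j, w =>
    let jw := pvWhile ps (target - s) j w
    pvCombine ps target r (total + c * jw.2) jw.1 jw.2

-- the singles loop: 'for y in range(2k+2): …; if s > target: break; append'
def pvSingles (target n : Int) : List (Int × Int) :=
  pvFor (fun y => decide (target < (2 * y + 1) ^ 2))
    (fun acc y => acc ++ [((2 * y + 1) ^ 2, if y == 0 then (1 : Int) else 2)])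
    (PySem.List.pyRange 0 n) []

-- the nested pair loop building the weighted pair-sum distribution
def pvPairs (target : Int) (singles : List (Int × Int)) : List (Int × Int) :=
  singles.foldl (fun acc p =>
    singles.foldl (fun acc q =>
      if p.1 + q.1 ≤ target then acc ++ [(p.1 + q.1, p.2 * q.2)] else acc) acc) []

def N_count_alt (k : Int) : Int :=
  let target := (4 * k + 2) ^ 2
  let sp := PySem.List.sorted (pvPairs target (pvSingles target (2 * k + 2))) (fun p => p.1)
  let w0 := sp.foldl (fun w p => w + p.2) 0
  pvCombine sp target sp 0 sp.length w0

-- ===== PRECONDITION & SPEC =====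
def Spec_N_count (k : Int) (out : Int) : Prop := out = N_count_alt k
instance (k : Int) (out : Int) : Decidable (Spec_N_count k out) := by unfold Spec_N_count; infer_instance

-- ===== CLAIM (what is proved, stated in full; the proofs are below) =====
def Claim_equal_N_count : Prop := ∀ (k : Int), Dom_N_count k → Spec_N_count k (N_count k)

-- ===== LEMMAS AND PROOFS =====

-- spec-side vocabulary
def pvSq (y : Int) : Int := (2 * y + 1) ^ 2
def pvW (y : Int) : Int := if 0 < y then 2 else 1
def pvList4 (x : Int × Int × Int × Int) : List Int := [x.1, x.2.1, x.2.2.1, x.2.2.2]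
def pvTup4 : List Int → Int × Int × Int × Int
  | [a, b, c, d] => (a, b, c, d)
  | _ => (0, 0, 0, 0)
-- number of distinct rearrangements of a 4-tuple
def pvMult (x : Int × Int × Int × Int) : Int :=
  (((pvList4 x).permutations'.map pvTup4).dedup.length : Int)
def pvG (T : Int) (l : List Int) : Int := if (l.map pvSq).sum ≤ T then (l.map pvW).prod else 0
def pvF (T : Int) (x : Int × Int × Int × Int) : Int := pvG T (pvList4 x)
def pvSrt (x : Int × Int × Int × Int) : Int × Int × Int × Int :=
  pvTup4 (List.insertionSort (fun a b => b ≤ a) (pvList4 x))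

-- sum of f over range(0, n)
def pvSumR (n : Int) (f : Int → Int) : Int := ((PySem.List.pyRange 0 n).map f).sum

def pvOrd (k : Int) : Int :=
  pvSumR (2 * k + 2) fun y1 => pvSumR (2 * k + 2) fun y2 =>
    pvSumR (2 * k + 2) fun y3 => pvSumR (2 * k + 2) fun y4 =>
      pvF ((4 * k + 2) ^ 2) (y1, y2, y3, y4)

def pvSortedSum (k : Int) : Int :=
  pvSumR (2 * k + 2) fun y1 => pvSumR (y1 + 1) fun y2 =>
    pvSumR (y2 + 1) fun y3 => pvSumR (y3 + 1) fun y4 =>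
      pvMult (y1, y2, y3, y4) * pvF ((4 * k + 2) ^ 2) (y1, y2, y3, y4)

-- generic break-elimination for pvFor with additive state
lemma pvFor_add (stop : Int → Bool) (g : Int → Int) (l : List Int)
    (h : l.Pairwise (fun a b => stop a = true → stop b = true)) (t : Int) :
    pvFor stop (fun t y => t + g y) l t
      = t + ((l.filter (fun y => !stop y)).map g).sum := by
  induction l generalizing t with
  | nil => simp [pvFor]
  | cons y r ih =>
    rw [List.pairwise_cons] at h
    by_cases hs : stop y = true
    · have hr : r.filter (fun y => !stop y) = [] := by
        rw [List.filter_eq_nil_iff]; intro a ha; simp [h.1 a ha hs]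
      simp [pvFor, hs, hr, List.filter_cons]
    · simp only [pvFor, hs, if_false, ih h.2, List.filter_cons]
      simp [hs]; ring

-- generic break-elimination for pvFor with list-append state
lemma pvFor_app {β : Type} (stop : Int → Bool) (f : Int → β) (l : List Int)
    (h : l.Pairwise (fun a b => stop a = true → stop b = true)) (acc : List β) :
    pvFor stop (fun acc y => acc ++ [f y]) l acc
      = acc ++ ((l.filter (fun y => !stop y)).map f) := by
  induction l generalizing acc with
  | nil => simp [pvFor]
  | cons y r ih =>
    rw [List.pairwise_cons] at h
    by_cases hs : stop y = true
    · have hr : r.filter (fun y => !stop y) = [] := by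
        rw [List.filter_eq_nil_iff]; intro a ha; simp [h.1 a ha hs]
      simp [pvFor, hs, hr, List.filter_cons]
    · simp only [pvFor, hs, if_false, ih h.2, List.filter_cons]
      simp [hs]

-- monotone stop condition on an ascending nonnegative range
lemma pvStopMono (T n : Int) (f : Int → Int) (hf : ∀ a b, 0 ≤ a → a < b → f a ≤ f b) :
    (PySem.List.pyRange 0 n).Pairwise
      (fun a b => (decide (T < f a) = true) → (decide (T < f b) = true)) := by
  refine List.Pairwise.imp_of_mem ?_ (PySem.List.pairwise_lt_pyRange_one 0 n)
  intro a b ha hb hab hsa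
  have ha0 : 0 ≤ a := (PySem.List.mem_pyRange_one.mp ha).1
  simp only [decide_eq_true_eq] at *
  have := hf a b ha0 hab
  omega

lemma pvSumFilter {α : Type} (p : α → Bool) (g : α → Int) (l : List α) :
    ((l.filter p).map g).sum = (l.map (fun x => if p x then g x else 0)).sum := by
  induction l with
  | nil => rfl
  | cons x r ih =>
    by_cases hx : p x = true <;> simp [List.filter_cons, hx, ih]

def pvCut (P : List (Int × Int)) (X : Int) : Int :=
  ((P.filter (fun q => decide (q.1 ≤ X))).map (·.2)).sum

lemma pvCut_eq_take (P : List (Int × Int)) (X : Int) (j : Nat) (hj : j ≤ P.length)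
    (hlow : ∀ i (hi : i < P.length), i < j → (P[i]).1 ≤ X)
    (hhigh : ∀ i (hi : i < P.length), j ≤ i → X < (P[i]).1) :
    pvCut P X = ((P.take j).map (·.2)).sum := by
  unfold pvCut
  have h1 : (P.take j).filter (fun q => decide (q.1 ≤ X)) = P.take j := by
    rw [List.filter_eq_self]
    intro a ha
    obtain ⟨i, hi, rfl⟩ := List.getElem_of_mem ha
    have hij : i < j := by
      have := hi; simp [List.length_take] at this; omega
    have hiP : i < P.length := lt_of_lt_of_le hij hj
    rw [List.getElem_take]
    simpa using hlow i hiP hij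
  have h2 : (P.drop j).filter (fun q => decide (q.1 ≤ X)) = [] := by
    rw [List.filter_eq_nil_iff]
    intro a ha
    obtain ⟨i, hi, rfl⟩ := List.getElem_of_mem ha
    have hiP : j + i < P.length := by
      have := hi; simp [List.length_drop] at this; omega
    rw [List.getElem_drop]
    simpa using hhigh (j + i) hiP (by omega)
  conv_lhs => rw [← List.take_append_drop j P]
  rw [List.filter_append, h1, h2, List.append_nil]

lemma pvWhile_spec (P : List (Int × Int)) (hP : P.Pairwise (fun a b => a.1 ≤ b.1)) (X : Int) :
    ∀ (j : Nat), j ≤ P.length → ∀ (w : Int), w = ((P.take j).map (·.2)).sum →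
    (∀ i (hi : i < P.length), j ≤ i → X < (P[i]).1) →
    (pvWhile P X j w).1 ≤ P.length ∧
    (pvWhile P X j w).2 = ((P.take (pvWhile P X j w).1).map (·.2)).sum ∧
    (∀ i (hi : i < P.length), (pvWhile P X j w).1 ≤ i → X < (P[i]).1) ∧
    (pvWhile P X j w).2 = pvCut P X := by
  intro j
  induction j with
  | zero =>
    intro hj w hw hhigh
    refine ⟨by simp [pvWhile], by simpa [pvWhile] using hw, ?_, ?_⟩
    · intro i hi _; exact hhigh i hi (Nat.zero_le i)
    · simp only [pvWhile]
      rw [hw, pvCut_eq_take P X 0 (Nat.zero_le _) (by intro i hi h; omega) hhigh]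
  | succ j ih =>
    intro hj w hw hhigh
    have hjP : j < P.length := hj
    by_cases hc : X < (P.getD j (0, 0)).1
    · have hget : P.getD j (0, 0) = P[j] := List.getD_eq_getElem P (0,0) hjP
      have hstep : pvWhile P X (j + 1) w = pvWhile P X j (w - (P.getD j (0, 0)).2) := by
        simp only [pvWhile, if_pos hc]
      rw [hstep]
      have htake : w - (P.getD j (0, 0)).2 = ((P.take j).map (·.2)).sum := by
        have hsplit : P.take (j + 1) = P.take j ++ [P[j]] := by
          rw [List.take_add_one, List.getElem?_eq_getElem hjP]; rfl
        rw [hw, hsplit, hget, List.map_append, List.sum_append]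
        simp
      have hhigh' : ∀ i (hi : i < P.length), j ≤ i → X < (P[i]).1 := by
        intro i hi hji
        rcases Nat.eq_or_lt_of_le hji with rfl | h
        · rw [hget] at hc; exact hc
        · exact hhigh i hi h
      exact ih (le_of_lt hjP) _ htake hhigh'
    · have hget : P.getD j (0, 0) = P[j] := List.getD_eq_getElem P (0,0) hjP
      have hres : pvWhile P X (j + 1) w = (j + 1, w) := by
        simp only [pvWhile, if_neg hc]
      rw [hres]
      have hjX : (P[j]).1 ≤ X := by rw [hget] at hc; omega
      have hlow : ∀ i (hi : i < P.length), i < j + 1 → (P[i]).1 ≤ X := by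
        intro i hi hij
        rcases Nat.lt_succ_iff_lt_or_eq.mp hij with h | rfl
        · exact le_trans (List.pairwise_iff_getElem.mp hP i j hi hjP h) hjX
        · exact hjX
      exact ⟨hj, hw, hhigh, by rw [hw, pvCut_eq_take P X (j+1) hj hlow hhigh]⟩

lemma pvCombine_spec (P : List (Int × Int)) (T : Int) (hP : P.Pairwise (fun a b => a.1 ≤ b.1)) :
    ∀ (rest : List (Int × Int)), rest.Pairwise (fun a b => a.1 ≤ b.1) →
    ∀ (j : Nat) (w total : Int), j ≤ P.length → w = ((P.take j).map (·.2)).sum →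
    (∀ i (hi : i < P.length), j ≤ i → ∀ p ∈ rest, T - p.1 < (P[i]).1) →
    pvCombine P T rest total j w
      = total + (rest.map (fun p => p.2 * pvCut P (T - p.1))).sum := by
  intro rest
  induction rest with
  | nil => intro _ j w total _ _ _; simp [pvCombine]
  | cons p r ih =>
    intro hsort j w total hj hw hhigh
    obtain ⟨s, c⟩ := p
    rw [List.pairwise_cons] at hsort
    obtain ⟨h1, h2, h3, h4⟩ := pvWhile_spec P hP (T - s) j hj w hw
      (fun i hi hji => hhigh i hi hji (s, c) List.mem_cons_self)
    simp only [pvCombine]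
    rw [ih hsort.2 (pvWhile P (T - s) j w).1 (pvWhile P (T - s) j w).2
      (total + c * (pvWhile P (T - s) j w).2) h1 h2 ?_]
    · rw [h4]; simp only [List.map_cons, List.sum_cons]; ring
    · intro i hi hji q hq
      have : T - q.1 ≤ T - s := by have := hsort.1 q hq; omega
      exact lt_of_le_of_lt this (h3 i hi hji)

lemma pvSqNonneg (y : Int) : 0 ≤ (2 * y + 1) ^ 2 := by positivity

lemma pvMapSumZero {α : Type} (l : List α) (f : α → Int) (h : ∀ y ∈ l, f y = 0) :
    (l.map f).sum = 0 := by
  apply List.sum_eq_zero; intro x hx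
  obtain ⟨y, hy, rfl⟩ := List.mem_map.mp hx; exact h y hy

lemma pvF_apply (T y1 y2 y3 y4 : Int) : pvF T (y1, y2, y3, y4)
    = if (2 * y1 + 1) ^ 2 + (2 * y2 + 1) ^ 2 + (2 * y3 + 1) ^ 2 + (2 * y4 + 1) ^ 2 ≤ T
      then pvW y1 * pvW y2 * pvW y3 * pvW y4 else 0 := by
  unfold pvF pvG pvList4 pvSq
  simp only [List.map_cons, List.map_nil, List.sum_cons, List.sum_nil, List.prod_cons,
    List.prod_nil]
  rw [show (2 * y1 + 1) ^ 2 + ((2 * y2 + 1) ^ 2 + ((2 * y3 + 1) ^ 2 + ((2 * y4 + 1) ^ 2 + 0)))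
      = (2 * y1 + 1) ^ 2 + (2 * y2 + 1) ^ 2 + (2 * y3 + 1) ^ 2 + (2 * y4 + 1) ^ 2 by ring,
    show pvW y1 * (pvW y2 * (pvW y3 * (pvW y4 * 1))) = pvW y1 * pvW y2 * pvW y3 * pvW y4 by ring]

lemma pvFor_congr {σ : Type} (stop : Int → Bool) (step step' : σ → Int → σ) (l : List Int)
    (h : ∀ t y, y ∈ l → step t y = step' t y) (t : σ) :
    pvFor stop step l t = pvFor stop step' l t := by
  induction l generalizing t with
  | nil => rfl
  | cons y r ih =>
    simp only [pvFor]
    by_cases hs : stop y = true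
    · simp [hs]
    · simp only [hs, if_false]
      rw [h t y List.mem_cons_self]
      exact ih (fun t y hy => h t y (List.mem_cons_of_mem _ hy)) _

lemma pvExists4 (l : List Int) (h : l.length = 4) : ∃ a b c d, l = [a, b, c, d] := by
  match l, h with
  | [a, b, c, d], _ => exact ⟨a, b, c, d, rfl⟩

lemma pvList4_tup4 (l : List Int) (h : l.length = 4) : pvList4 (pvTup4 l) = l := by
  obtain ⟨a, b, c, d, rfl⟩ := pvExists4 l h; rfl

lemma pvTup4_list4 (x : Int × Int × Int × Int) : pvTup4 (pvList4 x) = x := rfl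

-- sign multiplicity = product of the per-coordinate weights
lemma pvSign_eq (a b c d : Int) :
    pvSignMult a b c d = pvW a * pvW b * pvW c * pvW d := by
  unfold pvSignMult pvW
  by_cases ha : 0 < a <;> by_cases hb : 0 < b <;> by_cases hc : 0 < c <;> by_cases hd : 0 < d <;>
    simp [ha, hb, hc, hd] <;> decide

-- dedup length only depends on the equality kernel of the mapped function
lemma pvDedupLen {α β γ : Type} [DecidableEq β] [DecidableEq γ] (l : List α) (f : α → β)
    (g : α → γ) (h : ∀ p ∈ l, ∀ q ∈ l, (f p = f q ↔ g p = g q)) :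
    (l.map f).dedup.length = (l.map g).dedup.length := by
  induction l with
  | nil => rfl
  | cons x r ih =>
    have hmem : (f x ∈ r.map f) ↔ (g x ∈ r.map g) := by
      simp only [List.mem_map]
      constructor
      · rintro ⟨p, hp, hfp⟩
        exact ⟨p, hp, (h p (List.mem_cons_of_mem _ hp) x List.mem_cons_self).mp hfp⟩
      · rintro ⟨p, hp, hgp⟩
        exact ⟨p, hp, (h p (List.mem_cons_of_mem _ hp) x List.mem_cons_self).mpr hgp⟩
    have hr : ∀ p ∈ r, ∀ q ∈ r, (f p = f q ↔ g p = g q) :=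
      fun p hp q hq => h p (List.mem_cons_of_mem _ hp) q (List.mem_cons_of_mem _ hq)
    by_cases hx : f x ∈ r.map f
    · rw [List.map_cons, List.dedup_cons_of_mem hx, List.map_cons,
        List.dedup_cons_of_mem (hmem.mp hx)]
      exact ih hr
    · rw [List.map_cons, List.dedup_cons_of_notMem hx, List.map_cons,
        List.dedup_cons_of_notMem (fun hc => hx (hmem.mpr hc)), List.length_cons,
        List.length_cons, ih hr]

lemma pvTup4_inj (l l' : List Int) (h : l.length = 4) (h' : l'.length = 4) :
    pvTup4 l = pvTup4 l' ↔ l = l' := by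
  constructor
  · intro he; rw [← pvList4_tup4 l h, ← pvList4_tup4 l' h', he]
  · intro he; rw [he]

lemma pvMapCode {γ : Type} (yf : ℕ → Int) (pat : ℕ → γ) (dom : List ℕ)
    (hcode : ∀ u ∈ dom, ∀ v ∈ dom, (yf u = yf v ↔ pat u = pat v)) :
    ∀ p q : List ℕ, (∀ x ∈ p, x ∈ dom) → (∀ x ∈ q, x ∈ dom) →
      (p.map yf = q.map yf ↔ p.map pat = q.map pat) := by
  intro p
  induction p with
  | nil => intro q _ hq; cases q <;> simp
  | cons x r ih =>
    intro q hp hq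
    cases q with
    | nil => simp
    | cons y s =>
      simp only [List.map_cons, List.cons_eq_cons]
      have h1 := hcode x (hp x List.mem_cons_self) y (hq y List.mem_cons_self)
      have h2 := ih s (fun z hz => hp z (List.mem_cons_of_mem _ hz))
        (fun z hz => hq z (List.mem_cons_of_mem _ hz))
      rw [h1, h2]

def pvYf (a b c d : Int) : ℕ → Int
  | 0 => a
  | 1 => b
  | 2 => c
  | _ => d

lemma pvMultPat (a b c d : Int) (pat : ℕ → Int)
    (hcode : ∀ u ∈ ([0, 1, 2, 3] : List ℕ), ∀ v ∈ ([0, 1, 2, 3] : List ℕ),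
      (pvYf a b c d u = pvYf a b c d v ↔ pat u = pat v)) :
    pvMult (a, b, c, d)
      = ((([0, 1, 2, 3] : List ℕ).permutations'.map (fun p => pvTup4 (p.map pat))).dedup.length
          : Int) := by
  have h0 : pvList4 (a, b, c, d) = ([0, 1, 2, 3] : List ℕ).map (pvYf a b c d) := rfl
  have key : ((pvList4 (a, b, c, d)).permutations'.map pvTup4).dedup.length
      = ((([0, 1, 2, 3] : List ℕ).permutations'.map (fun p => pvTup4 (p.map pat))).dedup.length) := by
    rw [h0, ← List.map_permutations', List.map_map]
    apply pvDedupLen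
    intro p hp q hq
    have hpp := List.mem_permutations'.mp hp
    have hqp := List.mem_permutations'.mp hq
    have hplen : p.length = 4 := by rw [hpp.length_eq]; rfl
    have hqlen : q.length = 4 := by rw [hqp.length_eq]; rfl
    have hpm : ∀ x ∈ p, x ∈ ([0, 1, 2, 3] : List ℕ) := fun x hx => hpp.mem_iff.mp hx
    have hqm : ∀ x ∈ q, x ∈ ([0, 1, 2, 3] : List ℕ) := fun x hx => hqp.mem_iff.mp hx
    simp only [Function.comp_apply]
    rw [pvTup4_inj _ _ (by simp [hplen]) (by simp [hqlen]),
      pvTup4_inj _ _ (by simp [hplen]) (by simp [hqlen])]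
    exact pvMapCode _ _ _ hcode p q hpm hqm
  unfold pvMult
  exact_mod_cast key

lemma pvCounterValues (xs : List Int) :
    (PySem.Dict.counter xs).values
      = (PySem.Set.ofList xs).map (fun k => (xs.count k : Int)) := by
  have h := PySem.Dict.items_counter xs
  show (PySem.Dict.counter xs).items.map (·.2) = _
  rw [h, List.map_map]
  rfl

-- the body of A's innermost loop equals (#arrangements) * (product of sign weights)
lemma pv111 (q : Int) :
    pvSignMult q q q q * pvPermMult q q q q
      = pvMult (q, q, q, q) * (pvW q * pvW q * pvW q * pvW q) := by
  have hv : (PySem.Dict.counter [q, q, q, q]).values = [4] := by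
    rw [pvCounterValues]
    simp [PySem.Set.ofList, PySem.Set.add, List.count_cons]
  have hperm : pvPermMult q q q q = 1 := by
    unfold pvPermMult
    rw [hv]
    decide
  have hmult : pvMult (q, q, q, q) = 1 := by
    rw [pvMultPat _ _ _ _ (fun u => ([0,0,0,0] : List Int).getD u 0) ?_]
    · decide
    · intro u hu v hv
      simp only [List.mem_cons, List.not_mem_nil, or_false] at hu hv
      rcases hu with rfl | rfl | rfl | rfl <;> rcases hv with rfl | rfl | rfl | rfl <;>
        simp [pvYf] <;> omega
  rw [pvSign_eq, hperm, hmult]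
  ring

lemma pv110 (q r : Int) (hqr : q ≠ r):
    pvSignMult q q q r * pvPermMult q q q r
      = pvMult (q, q, q, r) * (pvW q * pvW q * pvW q * pvW r) := by
  have hv : (PySem.Dict.counter [q, q, q, r]).values = [3,1] := by
    rw [pvCounterValues]
    simp [PySem.Set.ofList, PySem.Set.add, List.count_cons, hqr, hqr.symm]
  have hperm : pvPermMult q q q r = 4 := by
    unfold pvPermMult
    rw [hv]
    decide
  have hmult : pvMult (q, q, q, r) = 4 := by
    rw [pvMultPat _ _ _ _ (fun u => ([0,0,0,3] : List Int).getD u 0) ?_]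
    · decide
    · intro u hu v hv
      simp only [List.mem_cons, List.not_mem_nil, or_false] at hu hv
      rcases hu with rfl | rfl | rfl | rfl <;> rcases hv with rfl | rfl | rfl | rfl <;>
        simp [pvYf] <;> omega
  rw [pvSign_eq, hperm, hmult]
  ring

lemma pv101 (q r : Int) (hqr : q ≠ r):
    pvSignMult q q r r * pvPermMult q q r r
      = pvMult (q, q, r, r) * (pvW q * pvW q * pvW r * pvW r) := by
  have hv : (PySem.Dict.counter [q, q, r, r]).values = [2,2] := by
    rw [pvCounterValues]
    simp [PySem.Set.ofList, PySem.Set.add, List.count_cons, hqr, hqr.symm]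
  have hperm : pvPermMult q q r r = 6 := by
    unfold pvPermMult
    rw [hv]
    decide
  have hmult : pvMult (q, q, r, r) = 6 := by
    rw [pvMultPat _ _ _ _ (fun u => ([0,0,2,2] : List Int).getD u 0) ?_]
    · decide
    · intro u hu v hv
      simp only [List.mem_cons, List.not_mem_nil, or_false] at hu hv
      rcases hu with rfl | rfl | rfl | rfl <;> rcases hv with rfl | rfl | rfl | rfl <;>
        simp [pvYf] <;> omega
  rw [pvSign_eq, hperm, hmult]
  ring

lemma pv100 (q r t : Int) (hqr : q ≠ r) (hqt : q ≠ t) (hrt : r ≠ t):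
    pvSignMult q q r t * pvPermMult q q r t
      = pvMult (q, q, r, t) * (pvW q * pvW q * pvW r * pvW t) := by
  have hv : (PySem.Dict.counter [q, q, r, t]).values = [2,1,1] := by
    rw [pvCounterValues]
    simp [PySem.Set.ofList, PySem.Set.add, List.count_cons, hqr, hqr.symm, hqt, hqt.symm, hrt, hrt.symm]
  have hperm : pvPermMult q q r t = 12 := by
    unfold pvPermMult
    rw [hv]
    decide
  have hmult : pvMult (q, q, r, t) = 12 := by
    rw [pvMultPat _ _ _ _ (fun u => ([0,0,2,3] : List Int).getD u 0) ?_]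
    · decide
    · intro u hu v hv
      simp only [List.mem_cons, List.not_mem_nil, or_false] at hu hv
      rcases hu with rfl | rfl | rfl | rfl <;> rcases hv with rfl | rfl | rfl | rfl <;>
        simp [pvYf] <;> omega
  rw [pvSign_eq, hperm, hmult]
  ring

lemma pv011 (q r : Int) (hqr : q ≠ r):
    pvSignMult q r r r * pvPermMult q r r r
      = pvMult (q, r, r, r) * (pvW q * pvW r * pvW r * pvW r) := by
  have hv : (PySem.Dict.counter [q, r, r, r]).values = [1,3] := by
    rw [pvCounterValues]
    simp [PySem.Set.ofList, PySem.Set.add, List.count_cons, hqr, hqr.symm]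
  have hperm : pvPermMult q r r r = 4 := by
    unfold pvPermMult
    rw [hv]
    decide
  have hmult : pvMult (q, r, r, r) = 4 := by
    rw [pvMultPat _ _ _ _ (fun u => ([0,1,1,1] : List Int).getD u 0) ?_]
    · decide
    · intro u hu v hv
      simp only [List.mem_cons, List.not_mem_nil, or_false] at hu hv
      rcases hu with rfl | rfl | rfl | rfl <;> rcases hv with rfl | rfl | rfl | rfl <;>
        simp [pvYf] <;> omega
  rw [pvSign_eq, hperm, hmult]
  ring

lemma pv010 (q r t : Int) (hqr : q ≠ r) (hqt : q ≠ t) (hrt : r ≠ t):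
    pvSignMult q r r t * pvPermMult q r r t
      = pvMult (q, r, r, t) * (pvW q * pvW r * pvW r * pvW t) := by
  have hv : (PySem.Dict.counter [q, r, r, t]).values = [1,2,1] := by
    rw [pvCounterValues]
    simp [PySem.Set.ofList, PySem.Set.add, List.count_cons, hqr, hqr.symm, hqt, hqt.symm, hrt, hrt.symm]
  have hperm : pvPermMult q r r t = 12 := by
    unfold pvPermMult
    rw [hv]
    decide
  have hmult : pvMult (q, r, r, t) = 12 := by
    rw [pvMultPat _ _ _ _ (fun u => ([0,1,1,3] : List Int).getD u 0) ?_]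
    · decide
    · intro u hu v hv
      simp only [List.mem_cons, List.not_mem_nil, or_false] at hu hv
      rcases hu with rfl | rfl | rfl | rfl <;> rcases hv with rfl | rfl | rfl | rfl <;>
        simp [pvYf] <;> omega
  rw [pvSign_eq, hperm, hmult]
  ring

lemma pv001 (q r t : Int) (hqr : q ≠ r) (hqt : q ≠ t) (hrt : r ≠ t):
    pvSignMult q r t t * pvPermMult q r t t
      = pvMult (q, r, t, t) * (pvW q * pvW r * pvW t * pvW t) := by
  have hv : (PySem.Dict.counter [q, r, t, t]).values = [1,1,2] := by
    rw [pvCounterValues]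
    simp [PySem.Set.ofList, PySem.Set.add, List.count_cons, hqr, hqr.symm, hqt, hqt.symm, hrt, hrt.symm]
  have hperm : pvPermMult q r t t = 12 := by
    unfold pvPermMult
    rw [hv]
    decide
  have hmult : pvMult (q, r, t, t) = 12 := by
    rw [pvMultPat _ _ _ _ (fun u => ([0,1,2,2] : List Int).getD u 0) ?_]
    · decide
    · intro u hu v hv
      simp only [List.mem_cons, List.not_mem_nil, or_false] at hu hv
      rcases hu with rfl | rfl | rfl | rfl <;> rcases hv with rfl | rfl | rfl | rfl <;>
        simp [pvYf] <;> omega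
  rw [pvSign_eq, hperm, hmult]
  ring

lemma pv000 (q r t u : Int) (hqr : q ≠ r) (hqt : q ≠ t) (hqu : q ≠ u) (hrt : r ≠ t) (hru : r ≠ u) (htu : t ≠ u):
    pvSignMult q r t u * pvPermMult q r t u
      = pvMult (q, r, t, u) * (pvW q * pvW r * pvW t * pvW u) := by
  have hv : (PySem.Dict.counter [q, r, t, u]).values = [1,1,1,1] := by
    rw [pvCounterValues]
    simp [PySem.Set.ofList, PySem.Set.add, List.count_cons, hqr, hqr.symm, hqt, hqt.symm, hqu, hqu.symm, hrt, hrt.symm, hru, hru.symm, htu, htu.symm]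
  have hperm : pvPermMult q r t u = 24 := by
    unfold pvPermMult
    rw [hv]
    decide
  have hmult : pvMult (q, r, t, u) = 24 := by
    rw [pvMultPat _ _ _ _ (fun u => ([0,1,2,3] : List Int).getD u 0) ?_]
    · decide
    · intro u hu v hv
      simp only [List.mem_cons, List.not_mem_nil, or_false] at hu hv
      rcases hu with rfl | rfl | rfl | rfl <;> rcases hv with rfl | rfl | rfl | rfl <;>
        simp [pvYf] <;> omega
  rw [pvSign_eq, hperm, hmult]
  ring

lemma pvBodyEq (a b c d : Int) (h0 : 0 ≤ d) (hdc : d ≤ c) (hcb : c ≤ b) (hba : b ≤ a) :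
    pvSignMult a b c d * pvPermMult a b c d
      = pvMult (a, b, c, d) * (pvW a * pvW b * pvW c * pvW d) := by
  by_cases hab : a = b <;> by_cases hbc : b = c <;> by_cases hcd : c = d
  · rw [hab, hbc, hcd]; exact pv111 d
  · rw [hab, hbc]; exact pv110 c d hcd
  · rw [hab, hcd]; exact pv101 b d (by omega)
  · rw [hab]; exact pv100 b c d hbc (by omega) hcd
  · rw [hbc, hcd]; exact pv011 a d (by omega)
  · rw [hbc]; exact pv010 a c d (by omega) (by omega) hcd
  · rw [hcd]; exact pv001 a b d hab (by omega) (by omega)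
  · exact pv000 a b c d hab (by omega) (by omega) hbc (by omega) hcd

lemma lemA (k : Int) : N_count k = pvSortedSum k := by
  have sqmono : ∀ a b : Int, 0 ≤ a → a < b → (2 * a + 1) ^ 2 ≤ (2 * b + 1) ^ 2 := by
    intro a b ha hab; nlinarith
  have hmem : ∀ m : Int, ∀ y ∈ PySem.List.pyRange 0 m, (0:Int) ≤ y :=
    fun m y hy => (PySem.List.mem_pyRange_one.mp hy).1
  simp only [N_count]
  rw [show ((2 * (2 * k + 1)) ^ 2 : Int) = (4 * k + 2) ^ 2 by ring,
    show ((2 * k + 1 + 1 : Int)) = 2 * k + 2 by ring]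
  set T := (4 * k + 2) ^ 2 with hT
  -- eliminate the four breaks, innermost first
  rw [pvFor_congr _ _ (fun t y1 =>
        pvFor (fun y2 => decide (T < (2 * y1 + 1) ^ 2 + (2 * y2 + 1) ^ 2))
          (fun t y2 =>
            pvFor (fun y3 => decide (T < (2 * y1 + 1) ^ 2 + (2 * y2 + 1) ^ 2 + (2 * y3 + 1) ^ 2))
              (fun t y3 => t +
                (((PySem.List.pyRange 0 (y3 + 1)).filter (fun y4 =>
                    !decide (T < (2 * y1 + 1) ^ 2 + (2 * y2 + 1) ^ 2 + (2 * y3 + 1) ^ 2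
                      + (2 * y4 + 1) ^ 2))).map
                  (fun y4 => pvSignMult y1 y2 y3 y4 * pvPermMult y1 y2 y3 y4)).sum)
              (PySem.List.pyRange 0 (y2 + 1)) t)
          (PySem.List.pyRange 0 (y1 + 1)) t)
      _ ?_]
  · -- now the remaining three loops
    rw [pvFor_congr _ _ (fun t y1 =>
          pvFor (fun y2 => decide (T < (2 * y1 + 1) ^ 2 + (2 * y2 + 1) ^ 2))
            (fun t y2 => t +
              (((PySem.List.pyRange 0 (y2 + 1)).filter (fun y3 =>
                  !decide (T < (2 * y1 + 1) ^ 2 + (2 * y2 + 1) ^ 2 + (2 * y3 + 1) ^ 2))).map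
                (fun y3 =>
                  (((PySem.List.pyRange 0 (y3 + 1)).filter (fun y4 =>
                      !decide (T < (2 * y1 + 1) ^ 2 + (2 * y2 + 1) ^ 2 + (2 * y3 + 1) ^ 2
                        + (2 * y4 + 1) ^ 2))).map
                    (fun y4 => pvSignMult y1 y2 y3 y4 * pvPermMult y1 y2 y3 y4)).sum)).sum)
            (PySem.List.pyRange 0 (y1 + 1)) t)
        _ ?_]
    · rw [pvFor_congr _ _ (fun t y1 => t +
            (((PySem.List.pyRange 0 (y1 + 1)).filter (fun y2 =>
                !decide (T < (2 * y1 + 1) ^ 2 + (2 * y2 + 1) ^ 2))).map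
              (fun y2 =>
                (((PySem.List.pyRange 0 (y2 + 1)).filter (fun y3 =>
                    !decide (T < (2 * y1 + 1) ^ 2 + (2 * y2 + 1) ^ 2 + (2 * y3 + 1) ^ 2))).map
                  (fun y3 =>
                    (((PySem.List.pyRange 0 (y3 + 1)).filter (fun y4 =>
                        !decide (T < (2 * y1 + 1) ^ 2 + (2 * y2 + 1) ^ 2 + (2 * y3 + 1) ^ 2
                          + (2 * y4 + 1) ^ 2))).map
                      (fun y4 => pvSignMult y1 y2 y3 y4 * pvPermMult y1 y2 y3 y4)).sum)).sum)).sum)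
          _ ?_]
      · rw [pvFor_add _ _ _ (pvStopMono T (2 * k + 2) (fun y => (2 * y + 1) ^ 2) sqmono)]
        rw [zero_add]
        -- both sides are now nested filtered sums; compare termwise
        unfold pvSortedSum pvSumR
        rw [← hT]
        simp only [pvSumFilter]
        congr 1
        apply List.map_congr_left
        intro y1 hy1
        obtain ⟨h1, h1b⟩ := PySem.List.mem_pyRange_one.mp hy1
        by_cases g1 : T < (2 * y1 + 1) ^ 2
        · rw [if_neg (by simp [g1])]
          symm
          apply pvMapSumZero; intro y2 _
          apply pvMapSumZero; intro y3 _
          apply pvMapSumZero; intro y4 _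
          have z2 := pvSqNonneg y2; have z3 := pvSqNonneg y3; have z4 := pvSqNonneg y4
          rw [pvF_apply, if_neg (by intro hcon; linarith), mul_zero]
        · rw [if_pos (by simp [g1])]
          congr 1
          apply List.map_congr_left
          intro y2 hy2
          obtain ⟨h2, h2b⟩ := PySem.List.mem_pyRange_one.mp hy2
          by_cases g2 : T < (2 * y1 + 1) ^ 2 + (2 * y2 + 1) ^ 2
          · rw [if_neg (by simp [g2])]
            symm
            apply pvMapSumZero; intro y3 _
            apply pvMapSumZero; intro y4 _
            have z3 := pvSqNonneg y3; have z4 := pvSqNonneg y4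
            rw [pvF_apply, if_neg (by intro hcon; linarith), mul_zero]
          · rw [if_pos (by simp [g2])]
            congr 1
            apply List.map_congr_left
            intro y3 hy3
            obtain ⟨h3, h3b⟩ := PySem.List.mem_pyRange_one.mp hy3
            by_cases g3 : T < (2 * y1 + 1) ^ 2 + (2 * y2 + 1) ^ 2 + (2 * y3 + 1) ^ 2
            · rw [if_neg (by simp [g3])]
              symm
              apply pvMapSumZero; intro y4 _
              have z4 := pvSqNonneg y4
              rw [pvF_apply, if_neg (by intro hcon; linarith), mul_zero]
            · rw [if_pos (by simp [g3])]
              congr 1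
              apply List.map_congr_left
              intro y4 hy4
              obtain ⟨h4, h4b⟩ := PySem.List.mem_pyRange_one.mp hy4
              by_cases g4 : T < (2 * y1 + 1) ^ 2 + (2 * y2 + 1) ^ 2 + (2 * y3 + 1) ^ 2
                  + (2 * y4 + 1) ^ 2
              · rw [if_neg (by simp [g4])]
                symm
                rw [pvF_apply, if_neg (by intro hcon; linarith), mul_zero]
              · rw [if_pos (by simp [g4]), pvF_apply, if_pos (by linarith)]
                exact pvBodyEq y1 y2 y3 y4 h4 (by omega) (by omega) (by omega)
      · intro t y1 hy1
        exact pvFor_add _ _ _ (pvStopMono T (y1 + 1)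
          (fun y => (2 * y1 + 1) ^ 2 + (2 * y + 1) ^ 2)
          (fun a b ha hab => by have := sqmono a b ha hab; linarith)) t
    · intro t y1 hy1
      refine pvFor_congr _ _ _ _ ?_ t
      intro t2 y2 hy2
      exact pvFor_add _ _ _ (pvStopMono T (y2 + 1)
        (fun y => (2 * y1 + 1) ^ 2 + (2 * y2 + 1) ^ 2 + (2 * y + 1) ^ 2)
        (fun a b ha hab => by have := sqmono a b ha hab; linarith)) t2
  · intro t y1 hy1
    refine pvFor_congr _ _ _ _ ?_ t
    intro t2 y2 hy2
    refine pvFor_congr _ _ _ _ ?_ t2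
    intro t3 y3 hy3
    exact pvFor_add _ _ _ (pvStopMono T (y3 + 1)
      (fun y => (2 * y1 + 1) ^ 2 + (2 * y2 + 1) ^ 2 + (2 * y3 + 1) ^ 2 + (2 * y + 1) ^ 2)
      (fun a b ha hab => by have := sqmono a b ha hab; linarith)) t3

lemma pvSumR_Icc (m : Int) (f : Int → Int) : pvSumR m f = ∑ y ∈ Finset.Icc 0 (m - 1), f y := by
  unfold pvSumR
  rw [← List.sum_toFinset f (PySem.List.nodup_pyRange_one 0 m)]
  congr 1
  ext y
  simp only [List.mem_toFinset, PySem.List.mem_pyRange_one, Finset.mem_Icc]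
  omega

lemma pvSrt_len (x : Int × Int × Int × Int) :
    (List.insertionSort (fun a b => b ≤ a) (pvList4 x)).length = 4 := by
  rw [List.length_insertionSort]; rfl

lemma pvSrt_perm (x : Int × Int × Int × Int) : (pvList4 (pvSrt x)).Perm (pvList4 x) := by
  unfold pvSrt
  rw [pvList4_tup4 _ (pvSrt_len x)]
  exact List.perm_insertionSort _ _

lemma pvSrt_sorted (x : Int × Int × Int × Int) :
    (pvList4 (pvSrt x)).Pairwise (fun a b => b ≤ a) := by
  unfold pvSrt
  rw [pvList4_tup4 _ (pvSrt_len x)]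
  exact List.pairwise_insertionSort _ _

lemma pvPairwise_of_dec (y : Int × Int × Int × Int)
    (h : y.2.1 ≤ y.1 ∧ y.2.2.1 ≤ y.2.1 ∧ y.2.2.2 ≤ y.2.2.1) :
    (pvList4 y).Pairwise (fun a b => b ≤ a) := by
  obtain ⟨a, b, c, d⟩ := y
  obtain ⟨h1, h2, h3⟩ := h
  simp only [pvList4] at *
  simp [List.pairwise_cons]
  omega

lemma pvSrt_eq (x y : Int × Int × Int × Int) (hperm : (pvList4 x).Perm (pvList4 y))
    (hy : (pvList4 y).Pairwise (fun a b => b ≤ a)) : pvSrt x = y := by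
  have h1 : List.insertionSort (fun a b => b ≤ a) (pvList4 x) = pvList4 y := by
    apply List.eq_of_perm_of_sorted (le := fun a b => b ≤ a)
      (fun a b _ _ hab hba => by omega)
      (List.pairwise_insertionSort _ _) hy
    exact (List.perm_insertionSort _ _).trans hperm
  unfold pvSrt
  rw [h1, pvTup4_list4]

lemma pvF_perm (T : Int) (x y : Int × Int × Int × Int) (h : (pvList4 x).Perm (pvList4 y)) :
    pvF T x = pvF T y := by
  unfold pvF pvG
  rw [(h.map pvSq).sum_eq, (h.map pvW).prod_eq]

lemma pvMem_list4 (x : Int × Int × Int × Int) (a : Int) :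
    a ∈ pvList4 x ↔ a = x.1 ∨ a = x.2.1 ∨ a = x.2.2.1 ∨ a = x.2.2.2 := by
  simp [pvList4]

lemma lemCore (k : Int) : pvSortedSum k = pvOrd k := by
  set T := (4 * k + 2) ^ 2 with hT
  set M := 2 * k + 1 with hM
  unfold pvSortedSum pvOrd
  simp only [pvSumR_Icc]
  rw [show ((2 * k + 2 : Int) - 1) = M by omega]
  simp only [add_sub_cancel_right]
  set Q : Finset (Int × Int × Int × Int) :=
    Finset.Icc 0 M ×ˢ (Finset.Icc 0 M ×ˢ (Finset.Icc 0 M ×ˢ Finset.Icc 0 M)) with hQ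
  set dec : Int × Int × Int × Int → Prop :=
    fun x => x.2.1 ≤ x.1 ∧ x.2.2.1 ≤ x.2.1 ∧ x.2.2.2 ≤ x.2.2.1 with hdec
  have hQmem : ∀ x : Int × Int × Int × Int, x ∈ Q ↔
      (0 ≤ x.1 ∧ x.1 ≤ M) ∧ (0 ≤ x.2.1 ∧ x.2.1 ≤ M) ∧ (0 ≤ x.2.2.1 ∧ x.2.2.1 ≤ M)
        ∧ (0 ≤ x.2.2.2 ∧ x.2.2.2 ≤ M) := by
    intro x
    simp [hQ, Finset.mem_product, Finset.mem_Icc]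
  -- left side as a guarded sum over the full cube
  have hL : (∑ y1 ∈ Finset.Icc 0 M, ∑ y2 ∈ Finset.Icc 0 y1, ∑ y3 ∈ Finset.Icc 0 y2,
        ∑ y4 ∈ Finset.Icc 0 y3, pvMult (y1, y2, y3, y4) * pvF T (y1, y2, y3, y4))
      = ∑ x ∈ Q, if dec x then pvMult x * pvF T x else 0 := by
    rw [hQ]
    rw [Finset.sum_product]
    simp only [Finset.sum_product]
    apply Finset.sum_congr rfl
    intro y1 hy1
    rw [Finset.mem_Icc] at hy1
    rw [show Finset.Icc (0:Int) y1 = (Finset.Icc 0 M).filter (fun y => y ≤ y1) from by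
      ext z; simp [Finset.mem_Icc, Finset.mem_filter]; omega]
    rw [Finset.sum_filter]
    apply Finset.sum_congr rfl
    intro y2 hy2
    rw [Finset.mem_Icc] at hy2
    by_cases h21 : y2 ≤ y1
    · rw [if_pos h21]
      rw [show Finset.Icc (0:Int) y2 = (Finset.Icc 0 M).filter (fun y => y ≤ y2) from by
        ext z; simp [Finset.mem_Icc, Finset.mem_filter]; omega]
      rw [Finset.sum_filter]
      apply Finset.sum_congr rfl
      intro y3 hy3
      rw [Finset.mem_Icc] at hy3
      by_cases h32 : y3 ≤ y2
      · rw [if_pos h32]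
        rw [show Finset.Icc (0:Int) y3 = (Finset.Icc 0 M).filter (fun y => y ≤ y3) from by
          ext z; simp [Finset.mem_Icc, Finset.mem_filter]; omega]
        rw [Finset.sum_filter]
        apply Finset.sum_congr rfl
        intro y4 hy4
        by_cases h43 : y4 ≤ y3
        · rw [if_pos h43, if_pos (by exact ⟨h21, h32, h43⟩)]
        · rw [if_neg h43, if_neg (by intro hc; exact h43 hc.2.2)]
      · rw [if_neg h32]
        symm
        apply Finset.sum_eq_zero
        intro y4 _
        rw [if_neg (by intro hc; exact h32 hc.2.1)]
    · rw [if_neg h21]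
      symm
      apply Finset.sum_eq_zero
      intro y3 _
      apply Finset.sum_eq_zero
      intro y4 _
      rw [if_neg (by intro hc; exact h21 hc.1)]
  -- right side as a sum over the cube
  have hR : (∑ y1 ∈ Finset.Icc 0 M, ∑ y2 ∈ Finset.Icc 0 M, ∑ y3 ∈ Finset.Icc 0 M,
        ∑ y4 ∈ Finset.Icc 0 M, pvF T (y1, y2, y3, y4)) = ∑ x ∈ Q, pvF T x := by
    rw [hQ, Finset.sum_product]
    simp only [Finset.sum_product]
  rw [hL, hR]
  -- fiberwise decomposition of the cube along the sorting map
  have hmaps : ∀ x ∈ Q, pvSrt x ∈ Q.filter (fun y => dec y) := by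
    intro x hx
    rw [Finset.mem_filter]
    constructor
    · rw [hQmem]
      have hp := pvSrt_perm x
      have hb : ∀ a ∈ pvList4 (pvSrt x), 0 ≤ a ∧ a ≤ M := by
        intro a ha
        have := hp.mem_iff.mp ha
        rw [pvMem_list4] at this
        rw [hQmem] at hx
        rcases this with rfl | rfl | rfl | rfl <;> tauto
      refine ⟨hb _ ?_, hb _ ?_, hb _ ?_, hb _ ?_⟩ <;> simp [pvMem_list4]
    · have hs := pvSrt_sorted x
      simp only [pvList4] at hs
      simp [List.pairwise_cons] at hs
      simp only [hdec]
      exact ⟨by tauto, by tauto, by tauto⟩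
  rw [← Finset.sum_fiberwise_of_maps_to hmaps (pvF T), ← Finset.sum_filter]
  -- each fiber contributes (#arrangements) * (common value)
  apply Finset.sum_congr rfl
  intro y hy
  rw [Finset.mem_filter] at hy
  obtain ⟨hyQ, hydec⟩ := hy
  have hysort : (pvList4 y).Pairwise (fun a b => b ≤ a) := pvPairwise_of_dec y hydec
  have hfib : Q.filter (fun x => pvSrt x = y)
      = ((pvList4 y).permutations'.map pvTup4).toFinset := by
    ext z
    rw [Finset.mem_filter, List.mem_toFinset, List.mem_map]
    constructor
    · rintro ⟨hzQ, rfl⟩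
      exact ⟨pvList4 z, List.mem_permutations'.mpr (pvSrt_perm z).symm, pvTup4_list4 z⟩
    · rintro ⟨l, hl, rfl⟩
      have hlp : l.Perm (pvList4 y) := List.mem_permutations'.mp hl
      have hlen : l.length = 4 := by rw [hlp.length_eq]; rfl
      have hl4 : pvList4 (pvTup4 l) = l := pvList4_tup4 l hlen
      have hzp : (pvList4 (pvTup4 l)).Perm (pvList4 y) := by rw [hl4]; exact hlp
      constructor
      · rw [hQmem]
        have hb : ∀ a ∈ pvList4 (pvTup4 l), 0 ≤ a ∧ a ≤ M := by
          intro a ha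
          have := hzp.mem_iff.mp ha
          rw [pvMem_list4] at this
          rw [hQmem] at hyQ
          rcases this with rfl | rfl | rfl | rfl <;> tauto
        refine ⟨hb _ ?_, hb _ ?_, hb _ ?_, hb _ ?_⟩ <;> simp [pvMem_list4]
      · exact pvSrt_eq _ _ hzp hysort
  symm
  rw [hfib]
  have hconst : ∀ z ∈ ((pvList4 y).permutations'.map pvTup4).toFinset, pvF T z = pvF T y := by
    intro z hz
    rw [List.mem_toFinset, List.mem_map] at hz
    obtain ⟨l, hl, rfl⟩ := hz
    have hlp : l.Perm (pvList4 y) := List.mem_permutations'.mp hl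
    have hlen : l.length = 4 := by rw [hlp.length_eq]; rfl
    exact pvF_perm T _ y (by rw [pvList4_tup4 l hlen]; exact hlp)
  rw [Finset.sum_congr rfl hconst, Finset.sum_const, nsmul_eq_mul, List.card_toFinset]
  rfl

lemma pvSumFlatMap {α : Type} (l : List α) (g : α → List Int) :
    (l.flatMap g).sum = (l.map (fun a => (g a).sum)).sum := by
  rw [List.flatMap, List.sum_flatten, List.map_map]; rfl

-- the two weight formulations agree on nonnegative y
lemma pvItemW (y : Int) (hy : 0 ≤ y) : (if y == 0 then (1 : Int) else 2) = pvW y := by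
  unfold pvW
  by_cases h : y = 0 <;> simp [h] <;> omega

lemma lemB (k : Int) : N_count_alt k = pvOrd k := by
  have sqmono : ∀ a b : Int, 0 ≤ a → a < b → (2 * a + 1) ^ 2 ≤ (2 * b + 1) ^ 2 := by
    intro a b ha hab; nlinarith
  set T := (4 * k + 2) ^ 2 with hTdef
  set n := 2 * k + 2 with hndef
  set RL := (PySem.List.pyRange 0 n).filter (fun y => !decide (T < (2 * y + 1) ^ 2)) with hRL
  set item : Int → Int × Int := fun y => ((2 * y + 1) ^ 2, if y == 0 then (1 : Int) else 2)
    with hitem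
  have hS : pvSingles T n = RL.map item := by
    unfold pvSingles
    rw [pvFor_app _ _ _ (pvStopMono T n (fun y => (2 * y + 1) ^ 2) sqmono)]
    rw [List.nil_append]
  set S := RL.map item with hSdef
  set mk : Int × Int → Int × Int → Int × Int := fun p q => (p.1 + q.1, p.2 * q.2) with hmk
  set PL := pvPairs T (pvSingles T n) with hPLdef
  have hPL : PL = S.flatMap (fun p => (S.filter (fun q => decide (p.1 + q.1 ≤ T))).map (mk p)) := by
    rw [hPLdef, hS]
    unfold pvPairs
    rw [PySem.List.foldl_congr_mem _ _
      (fun acc p => acc ++ (S.filter (fun q => decide (p.1 + q.1 ≤ T))).map (mk p)) _ ?_]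
    · rw [PySem.List.foldl_append_eq_flatMap]; simp [hSdef]
    · intro acc p _
      have h := PySem.List.foldl_append_if (fun q : Int × Int => decide (p.1 + q.1 ≤ T))
        (fun q : Int × Int => (p.1 + q.1, p.2 * q.2)) (RL.map item) acc
      simpa [hSdef, hmk] using h
  -- a sum over the pair distribution is a double sum over singles
  have hPLsum : ∀ h : Int × Int → Int, (PL.map h).sum
      = (RL.map (fun a => (RL.map (fun b =>
          if (item a).1 + (item b).1 ≤ T then h (mk (item a) (item b)) else 0)).sum)).sum := by
    intro h
    rw [hPL, List.map_flatMap, pvSumFlatMap]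
    simp only [List.map_map, hSdef]
    congr 1
    apply List.map_congr_left
    intro a _
    simp only [Function.comp_apply]
    rw [pvSumFilter, List.map_map]
    congr 1
    apply List.map_congr_left
    intro b _
    simp [hmk]
  -- run the combine loop
  set SP := PySem.List.sorted PL (fun p => p.1) with hSP
  have hsortP : SP.Pairwise (fun a b => a.1 ≤ b.1) := by
    simpa using PySem.List.sorted_pairwise PL (fun p => p.1)
  have hperm : SP.Perm PL := PySem.List.sorted_perm PL (fun p => p.1) false
  have hw0 : SP.foldl (fun w p => w + p.2) 0 = ((SP.take SP.length).map (·.2)).sum := by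
    rw [List.take_length]
    simpa using PySem.List.foldl_add SP (·.2) 0
  have hcomb := pvCombine_spec SP T hsortP SP hsortP SP.length
    (SP.foldl (fun w p => w + p.2) 0) 0 le_rfl hw0 (by intro i hi hle; omega)
  have hcut : ∀ X, pvCut SP X = pvCut PL X := by
    intro X; unfold pvCut
    exact ((hperm.filter _).map _).sum_eq
  have hB : N_count_alt k = (PL.map (fun p => p.2 * pvCut PL (T - p.1))).sum := by
    have hrfl : N_count_alt k = pvCombine SP T SP 0 SP.length
        (SP.foldl (fun w p => w + p.2) 0) := rfl
    rw [hrfl, hcomb]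
    simp only [hcut]
    rw [((hperm.map (fun p => p.2 * pvCut PL (T - p.1)))).sum_eq]
    ring
  rw [hB, hPLsum]
  have hcutX : ∀ X, pvCut PL X = (RL.map (fun u => (RL.map (fun v =>
      if (item u).1 + (item v).1 ≤ T then
        (if (mk (item u) (item v)).1 ≤ X then (mk (item u) (item v)).2 else 0)
      else 0)).sum)).sum := by
    intro X; unfold pvCut
    rw [pvSumFilter, hPLsum]
    simp [hmk]
  simp only [hcutX]
  -- open the filtered range: every sum becomes a sum over range(0, n)
  simp only [hRL, pvSumFilter]
  -- now compare with pvOrd term by term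
  unfold pvOrd pvSumR
  rw [← hTdef, ← hndef]
  have hit1 : ∀ y : Int, (item y).1 = (2 * y + 1) ^ 2 := fun y => rfl
  have hit2 : ∀ y : Int, 0 ≤ y → (item y).2 = pvW y := by
    intro y hy; rw [hitem]; exact pvItemW y hy
  have hmk1 : ∀ p q : Int × Int, (mk p q).1 = p.1 + q.1 := fun p q => rfl
  have hmk2 : ∀ p q : Int × Int, (mk p q).2 = p.2 * q.2 := fun p q => rfl
  have hmem : ∀ y ∈ PySem.List.pyRange 0 n, (0:Int) ≤ y :=
    fun y hy => (PySem.List.mem_pyRange_one.mp hy).1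
  congr 1
  apply List.map_congr_left
  intro y1 hy1
  have h1 := hmem y1 hy1
  have q1 := pvSqNonneg y1
  by_cases g1 : T < (2 * y1 + 1) ^ 2
  · rw [if_neg (by simp [g1])]
    symm
    apply pvMapSumZero; intro y2 _
    apply pvMapSumZero; intro y3 _
    apply pvMapSumZero; intro y4 _
    have z2 := pvSqNonneg y2; have z3 := pvSqNonneg y3; have z4 := pvSqNonneg y4
    rw [pvF_apply, if_neg (by intro hcon; linarith)]
  · rw [if_pos (by simp [g1])]
    congr 1
    apply List.map_congr_left
    intro y2 hy2
    have h2 := hmem y2 hy2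
    have q2 := pvSqNonneg y2
    by_cases g2 : T < (2 * y2 + 1) ^ 2
    · rw [if_neg (by simp [g2])]
      symm
      apply pvMapSumZero; intro y3 _
      apply pvMapSumZero; intro y4 _
      have z3 := pvSqNonneg y3; have z4 := pvSqNonneg y4
      rw [pvF_apply, if_neg (by intro hcon; linarith)]
    · rw [if_pos (by simp [g2])]
      simp only [hit1, hmk1, hmk2]
      by_cases g12 : ¬ ((2 * y1 + 1) ^ 2 + (2 * y2 + 1) ^ 2 ≤ T)
      · rw [if_neg g12]
        symm
        apply pvMapSumZero; intro y3 _
        apply pvMapSumZero; intro y4 _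
        have z3 := pvSqNonneg y3; have z4 := pvSqNonneg y4
        rw [pvF_apply, if_neg (by intro hcon; exact g12 (by linarith))]
      · rw [not_not] at g12
        rw [if_pos g12, ← List.sum_map_mul_left]
        congr 1
        apply List.map_congr_left
        intro y3 hy3
        have h3 := hmem y3 hy3
        have q3 := pvSqNonneg y3
        by_cases g3 : T < (2 * y3 + 1) ^ 2
        · rw [if_neg (by simp [g3]), mul_zero]
          symm
          apply pvMapSumZero; intro y4 _
          have z4 := pvSqNonneg y4
          rw [pvF_apply, if_neg (by intro hcon; linarith)]
        · rw [if_pos (by simp [g3]), ← List.sum_map_mul_left]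
          congr 1
          apply List.map_congr_left
          intro y4 hy4
          have h4 := hmem y4 hy4
          have q4 := pvSqNonneg y4
          rw [pvF_apply, hit2 y1 h1, hit2 y2 h2, hit2 y3 h3, hit2 y4 h4]
          simp only [Bool.not_eq_true', decide_eq_false_iff_not]
          split_ifs <;> first | ring1 | linarith | (exfalso; linarith)


-- ===== VERDICT (by name: the statement is the Claim_ definition above) =====
theorem N_count_spec : Claim_equal_N_count := by
  intro k _
  unfold Spec_N_count
  rw [lemA, lemCore, ← lemB]
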